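-- pv_equiv track=rewrite | github.com/lindseyalexanian/Code_test | biointech.py | make_them_ranks
-- ===== SOURCE A (Python) =====
-- def make_them_ranks(ordered_list):
--     ranks = []
--     counter = 0
--     for i in range(0, len(ordered_list)):
--
--         if i == 0:
--             counter += 1
--             ranks.append(counter)
--
--
--         elif ordered_list[i] < ordered_list[i - 1]:
--             counter += 1
--             ranks.append(counter)
--
--         else:
--             ranks.append(counter)
--
--
--     return ranks
-- ===== SOURCE B (Python) =====
-- def make_them_ranks(ordered_list):
--     # Partition the list into maximal non-descending runs; every element's rank
--     # is the 1-based position of the run it belongs to.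
--     runs = []
--     cur = []
--     for x in ordered_list:
--         if cur and x < cur[-1]:
--             runs.append(cur)
--             cur = [x]
--         else:
--             cur.append(x)
--     if cur:
--         runs.append(cur)
--     out = []
--     for pos, run in enumerate(runs, 1):
--         out.extend([pos] * len(run))
--     return out
-- ===== Notes on version B (the rewrite author's own statement) =====
-- stated objective: alternative
-- what changed: Instead of A's single pass with a running rank counter, B partitions the list into maximal non-descending runs (a list-of-runs data structure) and then emits each run's 1-based position replicated over the run's length.
import Mathlib
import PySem

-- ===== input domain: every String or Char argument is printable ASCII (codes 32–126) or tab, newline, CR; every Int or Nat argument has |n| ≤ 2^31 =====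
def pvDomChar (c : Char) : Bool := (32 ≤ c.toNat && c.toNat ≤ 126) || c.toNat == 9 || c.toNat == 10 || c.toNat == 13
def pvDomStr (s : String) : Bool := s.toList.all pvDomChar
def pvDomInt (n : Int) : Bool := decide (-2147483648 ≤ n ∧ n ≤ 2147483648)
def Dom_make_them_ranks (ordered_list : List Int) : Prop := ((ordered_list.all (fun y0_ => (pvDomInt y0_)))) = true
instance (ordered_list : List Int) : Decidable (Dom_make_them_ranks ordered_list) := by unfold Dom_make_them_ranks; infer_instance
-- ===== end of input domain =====

-- B replaces A's running-counter loop by a run decomposition: partition into maximal non-descending runs, then emit each run's 1-based position replicated (alternative algorithm, same cost).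


-- ===== PORT A =====
-- A's loop: state (ranks, counter), one step per index of range(len(ordered_list)).
def make_them_ranks (ordered_list : List Int) : List Int :=
  ((List.range ordered_list.length).foldl
    (fun (st : List Int × Int) (i : Nat) =>
      if i = 0 then
        (st.1 ++ [st.2 + 1], st.2 + 1)
      else if (PySem.List.pyGet? ordered_list (i : Int)).getD 0
                < (PySem.List.pyGet? ordered_list ((i : Int) - 1)).getD 0 then
        (st.1 ++ [st.2 + 1], st.2 + 1)
      else
        (st.1 ++ [st.2], st.2))
    ([], 0)).1

-- ===== PORT B =====
-- one step of B's first loop: start a new run on a strict descent against cur[-1], else extend cur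
def mtrStep (st : List (List Int) × List Int) (x : Int) : List (List Int) × List Int :=
  if st.2 ≠ [] ∧ x < (st.2.getLast?).getD 0 then (st.1 ++ [st.2], [x])
  else (st.1, st.2 ++ [x])

-- B's second loop: out.extend([pos] * len(run)) for pos, run in enumerate(runs, 1)
def mtrExpand (pos : Int) : List (List Int) → List Int
  | [] => []
  | r :: rs => List.replicate r.length pos ++ mtrExpand (pos + 1) rs

def make_them_ranks_alt (ordered_list : List Int) : List Int :=
  let st := ordered_list.foldl mtrStep ([], [])
  let runs := if st.2 ≠ [] then st.1 ++ [st.2] else st.1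
  mtrExpand 1 runs

-- ===== PRECONDITION & SPEC =====
def Spec_make_them_ranks (ordered_list : List Int) (out : List Int) : Prop := out = make_them_ranks_alt ordered_list
instance (ordered_list : List Int) (out : List Int) : Decidable (Spec_make_them_ranks ordered_list out) := by unfold Spec_make_them_ranks; infer_instance

-- ===== CLAIM (what is proved, stated in full; the proofs are below) =====
def Claim_equal_make_them_ranks : Prop := ∀ (ordered_list : List Int), Dom_make_them_ranks ordered_list → Spec_make_them_ranks ordered_list (make_them_ranks ordered_list)

-- ===== LEMMAS AND PROOFS =====

-- reference: ranks of xs, given rank counter c and the previous element prev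
def refAux (c prev : Int) : List Int → List Int
  | [] => []
  | x :: xs => if x < prev then (c + 1) :: refAux (c + 1) x xs else c :: refAux c x xs

theorem expand_append_single (cur : List Int) :
    ∀ (runs : List (List Int)) (k : Int),
      mtrExpand k (runs ++ [cur]) =
        mtrExpand k runs ++ List.replicate cur.length (k + runs.length) := by
  intro runs
  induction runs with
  | nil => intro k; simp [mtrExpand]
  | cons r rs ih =>
    intro k
    simp only [List.cons_append, mtrExpand, ih, List.length_cons, List.append_assoc]
    congr 2
    push_cast
    ring

-- invariant of B's first loop, read through the final expansion
theorem B_loop (xs : List Int) :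
    ∀ (runs : List (List Int)) (cur : List Int) (prev k : Int),
      cur ≠ [] → cur.getLast? = some prev →
      (let st := xs.foldl mtrStep (runs, cur)
       mtrExpand k (if st.2 ≠ [] then st.1 ++ [st.2] else st.1)) =
      mtrExpand k runs ++ List.replicate cur.length (k + runs.length) ++
        refAux (k + runs.length) prev xs := by
  induction xs with
  | nil =>
    intro runs cur prev k hne _
    simp only [List.foldl_nil, refAux, List.append_nil, if_pos hne]
    exact expand_append_single cur runs k
  | cons x xs ih =>
    intro runs cur prev k hne hlast
    by_cases hx : x < prev
    · have hstep : mtrStep (runs, cur) x = (runs ++ [cur], [x]) := by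
        simp [mtrStep, hne, hlast, hx]
      rw [List.foldl_cons, hstep,
        ih (runs ++ [cur]) [x] x k (by simp) (by simp)]
      rw [refAux, if_pos hx, expand_append_single]
      simp only [List.length_append, List.length_cons, List.length_nil,
        List.append_assoc]
      push_cast
      simp [add_assoc]
    · have hstep : mtrStep (runs, cur) x = (runs, cur ++ [x]) := by
        simp [mtrStep, hne, hlast, hx]
      rw [List.foldl_cons, hstep,
        ih runs (cur ++ [x]) x k (by simp) (by simp)]
      rw [refAux, if_neg hx]
      simp only [List.length_append, List.length_cons, List.length_nil,
        List.replicate_succ', List.append_assoc, List.singleton_append]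

theorem B_eq_ref : ∀ (l : List Int),
    make_them_ranks_alt l =
      match l with
      | [] => []
      | x :: xs => 1 :: refAux 1 x xs := by
  intro l
  cases l with
  | nil => simp [make_them_ranks_alt, mtrExpand]
  | cons x xs =>
    show make_them_ranks_alt (x :: xs) = 1 :: refAux 1 x xs
    have hstep : mtrStep (([] : List (List Int)), ([] : List Int)) x = ([], [x]) := by
      simp [mtrStep]
    have := B_loop xs [] [x] x 1 (by simp) (by simp)
    simp only [make_them_ranks_alt, List.foldl_cons, hstep] at *
    rw [this]
    simp [mtrExpand]

-- A's loop reduced: generic index list, generic accumulator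
def mtrFlag (ordered_list : List Int) (i : Nat) : Int :=
  if i = 0 ∨ (PySem.List.pyGet? ordered_list (i : Int)).getD 0
               < (PySem.List.pyGet? ordered_list ((i : Int) - 1)).getD 0 then 1 else 0

def mtrAccumulate (acc : Int) : List Int → List Int
  | [] => []
  | x :: xs => (acc + x) :: mtrAccumulate (acc + x) xs

theorem mtr_loop (l : List Int) (is : List Nat) (r : List Int) (c : Int) :
    (is.foldl
      (fun (st : List Int × Int) (i : Nat) =>
        if i = 0 then
          (st.1 ++ [st.2 + 1], st.2 + 1)
        else if (PySem.List.pyGet? l (i : Int)).getD 0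
                  < (PySem.List.pyGet? l ((i : Int) - 1)).getD 0 then
          (st.1 ++ [st.2 + 1], st.2 + 1)
        else
          (st.1 ++ [st.2], st.2))
      (r, c)).1 = r ++ mtrAccumulate c (is.map (mtrFlag l)) := by
  induction is generalizing r c with
  | nil => simp [mtrAccumulate]
  | cons i is ih =>
    by_cases h0 : i = 0
    · have hf : mtrFlag l i = 1 := by rw [mtrFlag, if_pos (Or.inl h0)]
      rw [List.foldl_cons, List.map_cons, if_pos h0, ih, hf, mtrAccumulate,
        List.append_assoc, List.singleton_append]
    · by_cases hlt : (PySem.List.pyGet? l (i : Int)).getD 0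
          < (PySem.List.pyGet? l ((i : Int) - 1)).getD 0
      · have hf : mtrFlag l i = 1 := by rw [mtrFlag, if_pos (Or.inr hlt)]
        rw [List.foldl_cons, List.map_cons, if_neg h0, if_pos hlt, ih, hf, mtrAccumulate,
          List.append_assoc, List.singleton_append]
      · have hf : mtrFlag l i = 0 := by
          rw [mtrFlag, if_neg]
          exact fun h => h.elim h0 hlt
        rw [List.foldl_cons, List.map_cons, if_neg h0, if_neg hlt, ih, hf, mtrAccumulate,
          add_zero, List.append_assoc, List.singleton_append]

-- accumulation over the flags of a suffix equals the reference ranks of that suffix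
theorem accum_suffix (l : List Int) :
    ∀ (ys pre : List Int) (c prev : Int),
      l = pre ++ ys → pre.getLast? = some prev →
      mtrAccumulate c ((List.range' pre.length ys.length 1).map (mtrFlag l)) =
        refAux c prev ys := by
  intro ys
  induction ys with
  | nil => intro pre c prev _ _; simp [mtrAccumulate, refAux]
  | cons y ys ih =>
    intro pre c prev hl hlast
    have hpre : pre ≠ [] := by
      intro h; rw [h] at hlast; simp at hlast
    have hj : 1 ≤ pre.length := List.length_pos_of_ne_nil hpre
    have hgy : PySem.List.pyGet? l (pre.length : Int) = some y := by
      rw [hl]; exact PySem.List.pyGet?_append_length pre ys y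
    have hgp : PySem.List.pyGet? l ((pre.length : Int) - 1) = some prev := by
      have h1 : ((pre.length : Int) - 1) = ((pre.length - 1 : Nat) : Int) := by omega
      rw [h1, PySem.List.pyGet?_natCast, hl, List.getElem?_append_left (by omega)]
      rw [List.getLast?_eq_getElem?] at hlast
      exact hlast
    have hflag : mtrFlag l pre.length = if y < prev then 1 else 0 := by
      rw [mtrFlag, hgy, hgp]
      simp only [Option.getD_some]
      by_cases hyp : y < prev
      · rw [if_pos hyp, if_pos (Or.inr hyp)]
      · rw [if_neg hyp, if_neg]
        exact fun h => h.elim (fun h0 => absurd h0 (by omega)) hyp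
    have ihx := ih (pre ++ [y]) (c + (if y < prev then 1 else 0)) y
      (by rw [hl]; simp) (by simp)
    simp only [List.length_append, List.length_cons, List.length_nil] at ihx
    simp only [List.length_cons]
    rw [List.range'_succ, List.map_cons, mtrAccumulate, hflag, refAux]
    by_cases hyp : y < prev
    · simp only [if_pos hyp] at ihx ⊢
      rw [ihx]
    · simp only [if_neg hyp, add_zero] at ihx ⊢
      rw [ihx]

theorem A_eq_ref : ∀ (l : List Int),
    make_them_ranks l =
      match l with
      | [] => []
      | x :: xs => 1 :: refAux 1 x xs := by
  intro l
  cases l with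
  | nil => simp [make_them_ranks]
  | cons x xs =>
    show make_them_ranks (x :: xs) = 1 :: refAux 1 x xs
    unfold make_them_ranks
    rw [mtr_loop]
    have hr : List.range (x :: xs).length = 0 :: List.range' 1 xs.length 1 := by
      rw [List.range_eq_range', List.length_cons, List.range'_succ]
    rw [hr, List.map_cons]
    have hf0 : mtrFlag (x :: xs) 0 = 1 := by rw [mtrFlag, if_pos (Or.inl rfl)]
    rw [hf0, mtrAccumulate, zero_add]
    have := accum_suffix (x :: xs) xs [x] 1 x (by simp) (by simp)
    simp only [List.length_cons, List.length_nil, zero_add] at this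
    rw [this]
    simp

-- ===== VERDICT (by name: the statement is the Claim_ definition above) =====
theorem make_them_ranks_spec : Claim_equal_make_them_ranks := by
  intro l _
  show make_them_ranks l = make_them_ranks_alt l
  rw [A_eq_ref, B_eq_ref]
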